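-- pv_equiv track=rewrite | github.com/gowthm/logical-problems | leet_code/merge_similar_items.py | mergeSimilarItems
-- ===== SOURCE A (Python) =====
-- def mergeSimilarItems(items1, items2):
--     obj = {}
--     for val, weight in items1+items2:
--         obj[val] = obj.get(val, 0)+weight
--     ret = []
--     for v,w in obj.items():
--         ret.append([v,w])
--     ret.sort()
--     return ret
-- ===== SOURCE B (Python) =====
-- def mergeSimilarItems(items1, items2):
--     combined = items1 + items2
--     return [[v, sum(p[1] for p in combined if p[0] == v)]
--             for v in sorted({p[0] for p in combined})]
-- ===== Notes on version B (the rewrite author's own statement) =====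
-- stated objective: simpler
-- what changed: Replaces A's dict accumulation followed by sorting the [value,weight] pairs with a single comprehension: sort the distinct values and sum the matching weights per value by a linear scan, with no dict at all.
import Mathlib
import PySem

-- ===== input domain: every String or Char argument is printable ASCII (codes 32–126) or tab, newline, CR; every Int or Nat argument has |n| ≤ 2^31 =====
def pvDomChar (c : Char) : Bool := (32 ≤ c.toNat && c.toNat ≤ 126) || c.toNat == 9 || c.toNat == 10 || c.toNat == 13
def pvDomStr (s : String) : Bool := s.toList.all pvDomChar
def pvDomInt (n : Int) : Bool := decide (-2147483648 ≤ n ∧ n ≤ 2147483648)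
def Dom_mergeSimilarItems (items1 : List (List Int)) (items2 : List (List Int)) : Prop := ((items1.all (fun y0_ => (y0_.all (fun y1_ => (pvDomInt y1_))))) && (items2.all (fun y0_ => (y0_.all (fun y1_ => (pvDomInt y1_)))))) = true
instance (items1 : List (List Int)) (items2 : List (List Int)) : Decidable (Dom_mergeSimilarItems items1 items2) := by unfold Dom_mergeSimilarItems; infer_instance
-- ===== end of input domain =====

-- B replaces A's dict-accumulation-then-sort by a per-value scan over the sorted distinct
-- values (objective: simpler — no dict, one comprehension).

-- ===== PORT A =====
def mergeSimilarItems (items1 : List (List Int)) (items2 : List (List Int)) : List (List Int) :=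
  -- for val, weight in items1+items2: obj[val] = obj.get(val, 0)+weight
  -- (tuple unpacking raises ValueError unless the inner list has exactly 2 elements;
  --  those inputs are outside Pre_, the catch-all branch is never reached there)
  let obj : PySem.Dict Int Int :=
    (items1 ++ items2).foldl (fun d p =>
      match p with
      | [val, weight] => d.modify val 0 (fun x => x + weight)
      | _ => d) PySem.Dict.empty
  -- for v,w in obj.items(): ret.append([v,w])
  let ret := obj.items.foldl (fun r vw => r ++ [[vw.1, vw.2]]) []
  -- ret.sort()  (Python sorts the two-element lists lexicographically)
  PySem.List.sorted ret (fun x => x) false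

-- ===== PORT B =====
def mergeSimilarItems_alt (items1 : List (List Int)) (items2 : List (List Int)) : List (List Int) :=
  let combined := items1 ++ items2
  -- [[v, sum(p[1] for p in combined if p[0] == v)] for v in sorted({p[0] for p in combined})]
  -- (p[0] / p[1] ported as pyGetD, exact under Pre_ where every inner list has length 2)
  (PySem.List.sorted
      (PySem.Set.ofList (combined.map (fun p => PySem.List.pyGetD p 0 0)))
      (fun v => v) false).map
    (fun v =>
      [v, ((combined.filter (fun p => PySem.List.pyGetD p 0 0 == v)).map
            (fun p => PySem.List.pyGetD p 1 0)).sum])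

-- ===== PRECONDITION & SPEC =====
-- Pre_ excludes inner lists whose length is not 2: Python A's 'for val, weight in …'
-- raises ValueError there (and B's p[0]/p[1] raise IndexError on short lists).
def Pre_mergeSimilarItems (items1 : List (List Int)) (items2 : List (List Int)) : Prop :=
  ∀ p ∈ items1 ++ items2, p.length = 2
instance (items1 : List (List Int)) (items2 : List (List Int)) : Decidable (Pre_mergeSimilarItems items1 items2) := by unfold Pre_mergeSimilarItems; infer_instance
def pvWitness_mergeSimilarItems : List (List Int) × List (List Int) := ([[1, 2], [3, 4]], [[1, 5]])

def Spec_mergeSimilarItems (items1 : List (List Int)) (items2 : List (List Int)) (out : List (List Int)) : Prop := out = mergeSimilarItems_alt items1 items2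
instance (items1 : List (List Int)) (items2 : List (List Int)) (out : List (List Int)) : Decidable (Spec_mergeSimilarItems items1 items2 out) := by unfold Spec_mergeSimilarItems; infer_instance

-- ===== CLAIM (what is proved, stated in full; the proofs are below) =====
def Claim_equal_mergeSimilarItems : Prop := ∀ (items1 : List (List Int)) (items2 : List (List Int)), Dom_mergeSimilarItems items1 items2 → Pre_mergeSimilarItems items1 items2 → Spec_mergeSimilarItems items1 items2 (mergeSimilarItems items1 items2)

-- ===== LEMMAS AND PROOFS =====

-- first / second component of an inner pair, as B reads them
def pvHd (p : List Int) : Int := PySem.List.pyGetD p 0 0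
def pvWt (p : List Int) : Int := PySem.List.pyGetD p 1 0

lemma pvHd_pair (a b : Int) : pvHd [a, b] = a := by
  simp [pvHd, PySem.List.pyGetD, PySem.List.pyGet?, PySem.List.pyIdx?]

lemma pvWt_pair (a b : Int) : pvWt [a, b] = b := by
  simp [pvWt, PySem.List.pyGetD, PySem.List.pyGet?, PySem.List.pyIdx?]

-- the dict-accumulation loop computes, at each key, the sum of matching weights
lemma pvGetD_fold (l : List (List Int)) (d : PySem.Dict Int Int) (v : Int) :
    (l.foldl (fun d p => d.modify (pvHd p) 0 (fun x => x + pvWt p)) d).getD v 0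
      = d.getD v 0 + ((l.filter (fun p => pvHd p == v)).map pvWt).sum := by
  induction l generalizing d with
  | nil => simp
  | cons p t ih =>
    simp only [List.foldl_cons, ih, List.filter_cons]
    by_cases h : pvHd p = v
    · simp [h]
      ring
    · simp [h, PySem.Dict.getD_modify, Ne.symm h]

-- the append loop building ret is a map
lemma pvFoldl_append_map (l : List (Int × Int)) (acc : List (List Int)) :
    l.foldl (fun r vw => r ++ [[vw.1, vw.2]]) acc
      = acc ++ l.map (fun vw => [vw.1, vw.2]) := by
  induction l generalizing acc with
  | nil => simp
  | cons x t ih => simp [ih]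

-- the two LT/Decidable instance routes for sorting List Int elements coincide
lemma pvSorted_inst (xs : List (List Int)) :
    @PySem.List.sorted _ _ List.instLT (fun a b => a.decidableLT b) xs (fun x => x) false
      = @PySem.List.sorted _ _ LinearOrder.toPartialOrder.toLT LinearOrder.toDecidableLT
          xs (fun x => x) false := by
  congr 1

theorem mergeSimilarItems_spec_aux :
    ∀ (items1 items2 : List (List Int)), Pre_mergeSimilarItems items1 items2 →
      mergeSimilarItems items1 items2 = mergeSimilarItems_alt items1 items2 := by
  intro items1 items2 hpre
  show mergeSimilarItems items1 items2 = mergeSimilarItems_alt items1 items2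
  simp only [mergeSimilarItems, mergeSimilarItems_alt]
  set L := items1 ++ items2 with hL
  -- rewrite A's unpacking fold into a modify-by-key fold
  have hcongr :
      L.foldl (fun d p =>
        match p with
        | [val, weight] => d.modify val 0 (fun x => x + weight)
        | _ => d) PySem.Dict.empty
      = L.foldl (fun d p => d.modify (pvHd p) 0 (fun x => x + pvWt p)) PySem.Dict.empty := by
    apply PySem.List.foldl_congr_mem
    intro d p hp
    have h2 := hpre p hp
    match p, h2 with
    | [a, b], _ => simp [pvHd_pair, pvWt_pair]
  rw [hcongr]
  set obj := L.foldl (fun d p => d.modify (pvHd p) 0 (fun x => x + pvWt p)) PySem.Dict.empty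
    with hobj
  have hnodup : obj.keys.Nodup := by
    rw [hobj]
    exact PySem.Dict.nodup_keys_foldl_modify_key L pvHd 0 (fun _ p => fun x => x + pvWt p)
      PySem.Dict.empty (by simp)
  have hkeys : obj.keys = PySem.Set.ofList (L.map pvHd) := by
    rw [hobj]
    rw [PySem.Dict.keys_foldl_modify_key L pvHd 0 (fun _ p => fun x => x + pvWt p)
      PySem.Dict.empty]
    simp [PySem.Set.update, PySem.Set.ofList]
  have hitems : obj.items = obj.keys.map (fun k => (k, obj.getD k 0)) :=
    PySem.Dict.items_eq_map_keys obj hnodup 0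
  have hgetD : ∀ v, obj.getD v 0 = ((L.filter (fun p => pvHd p == v)).map pvWt).sum := by
    intro v
    rw [hobj, pvGetD_fold]
    simp
  -- A's ret is the keys mapped through k ↦ [k, sum], then sorted
  rw [pvFoldl_append_map, hitems, List.nil_append, List.map_map]
  -- the common per-key output function (definitionally B's comprehension body)
  set f : Int → List Int :=
    fun k => [k, ((L.filter (fun p => pvHd p == k)).map pvWt).sum] with hf
  have hfun2 : obj.keys.map ((fun vw : Int × Int => [vw.1, vw.2]) ∘ fun k => (k, obj.getD k 0))
      = obj.keys.map f := by
    apply List.map_congr_left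
    intro k _
    simp [hf, Function.comp, hgetD]
  rw [hfun2, hkeys]
  show PySem.List.sorted ((PySem.Set.ofList (L.map pvHd)).map f) (fun x => x) false
      = (PySem.List.sorted (PySem.Set.ofList (L.map pvHd)) (fun v => v) false).map f
  rw [pvSorted_inst]
  -- sorting the mapped pairs = mapping the sorted keys (f is strictly monotone)
  apply PySem.List.sorted_eq_of_perm_of_pairwise_lt
  · exact List.Perm.map f (PySem.List.sorted_perm (PySem.Set.ofList (L.map pvHd)) (fun v => v) false)
  · refine List.Pairwise.map f ?_ (PySem.List.sorted_ofList_pairwise_lt (L.map pvHd))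
    intro a b hab
    exact List.Lex.rel hab

-- ===== VERDICT (by name: the statement is the Claim_ definition above) =====
theorem mergeSimilarItems_spec : Claim_equal_mergeSimilarItems := by
  intro items1 items2 _ hpre
  exact mergeSimilarItems_spec_aux items1 items2 hpre
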